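-- pv_equiv track=rewrite | github.com/benquick123/code-profiling | code/batch-2/dn6 - spet tviti/M-17225-2032.py | omembe
-- ===== SOURCE A (Python) =====
-- def avtor(tvit):
--     s = tvit.split(':')
--     return s[0]
--
-- def vsi_avtorji(tvits):
--     d = []
--     for s in tvits:
--        if d.count(avtor(s)) == 0:
--             d.append(avtor(s))
--     return d
--
-- def izloci_besedo(beseda):
--     while beseda[0].isalnum() == False:
--         beseda = beseda[1:]
--     while beseda[-1].isalnum() == False:
--         beseda = beseda[:-1]
--     return beseda
--
-- def se_zacne_z(tvit, c):
--     tvit = tvit.split()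
--     d = []
--     for s in tvit:
--         if s[0] == c:
--             d.append(izloci_besedo(s))
--     return d
--
-- def omembe(tviti):
--     avt = vsi_avtorji(tviti)
--     dic = dict.fromkeys(avt, None)
--     for i in tviti:
--         s = i.split(':')
--         if dic[s[0]] == None:
--             dic[s[0]] = se_zacne_z(i, '@')
--         else:
--             dic[s[0]] += se_zacne_z(i, '@')
--     return dic
-- ===== SOURCE B (Python) =====
-- def _omembe_tvita(t):
--     # one character-level pass over the tweet: build whitespace-delimited words;
--     # for '@'-words keep the slice from the first to the last alphanumeric char
--     omenjeni = []
--     beseda = []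
--     for c in t + ' ':
--         if c.isspace():
--             if beseda and beseda[0] == '@':
--                 idx = [k for k, ch in enumerate(beseda) if ch.isalnum()]
--                 omenjeni.append(''.join(beseda[idx[0]:idx[-1] + 1]))
--             beseda = []
--         else:
--             beseda.append(c)
--     return omenjeni
--
-- def omembe(tviti):
--     rez = {}
--     for t in tviti:
--         i = t.find(':')
--         avt = t if i < 0 else t[:i]
--         rez.setdefault(avt, []).extend(_omembe_tvita(t))
--     return rez
-- ===== Notes on version B (the rewrite author's own statement) =====
-- stated objective: faster
-- what changed: B replaces A's three-stage pipeline (quadratic distinct-author pre-pass, dict.fromkeys None-sentinel fill, per-word split + two while-loop edge strips) by a single pass that finds the author with str.find(':') and groups via dict.setdefault(...).extend, and extracts mentions with one character-level scan per tweet that tokenizes by hand and trims each '@'-word by slicing between its first and last alphanumeric index.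
import Mathlib
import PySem

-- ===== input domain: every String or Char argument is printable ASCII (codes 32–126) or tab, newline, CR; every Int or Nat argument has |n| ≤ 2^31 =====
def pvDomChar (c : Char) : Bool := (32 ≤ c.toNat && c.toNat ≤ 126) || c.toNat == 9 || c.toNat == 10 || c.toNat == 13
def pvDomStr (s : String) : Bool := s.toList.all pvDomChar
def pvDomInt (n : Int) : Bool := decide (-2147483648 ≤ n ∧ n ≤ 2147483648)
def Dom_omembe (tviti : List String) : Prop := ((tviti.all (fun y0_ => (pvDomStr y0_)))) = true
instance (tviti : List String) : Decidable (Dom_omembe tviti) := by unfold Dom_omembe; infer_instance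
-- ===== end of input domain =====

-- B replaces A's pipeline (distinct-author pre-pass with list.count, dict.fromkeys None-sentinel
-- fill, per-word split with two while-loop edge strips) by one setdefault/extend pass that finds
-- the author with str.find(':') and extracts mentions with a character-level scan that tokenizes
-- by hand and trims each '@'-word by slicing between its first and last alphanumeric index
-- (objective: faster — drops the quadratic author pre-pass, measured).

-- ===== PORT A =====
-- def avtor(tvit): s = tvit.split(':'); return s[0]
-- (.getD fallbacks stand for paths Python cannot reach: split(':') is never empty)
def avtorA (tvit : String) : String :=
  (PySem.List.pyGet? ((PySem.Str.split? tvit ":").getD []) 0).getD ""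

def vsi_avtorjiA (tvits : List String) : List String :=
  tvits.foldl (fun d s => if PySem.List.count d (avtorA s) == 0 then d ++ [avtorA s] else d) []

-- while beseda[0].isalnum() == False: beseda = beseda[1:]   (none = IndexError)
def stripFrontA (b : List Char) : Option (List Char) :=
  match b with
  | [] => none
  | c :: cs => if PySem.Chars.isalnum c = false then stripFrontA cs else some (c :: cs)

-- while beseda[-1].isalnum() == False: beseda = beseda[:-1]   (none = IndexError)
def stripBackA (b : List Char) : Option (List Char) :=
  if hb : b = [] then none   -- beseda[-1] on the empty string raises IndexError
  else if PySem.Chars.isalnum (b.getLast hb) = false then stripBackA b.dropLast else some b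
termination_by b.length
decreasing_by
  have : 0 < b.length := List.length_pos_iff.mpr hb
  simp [List.length_dropLast]; omega

def izlociA (b : List Char) : Option (List Char) := (stripFrontA b).bind stripBackA

-- (the .getD [] stands for the IndexError path, excluded by Pre_)
def se_zacne_zA (tvit : String) (c : Char) : List String :=
  (PySem.Str.split₀ tvit).foldl (fun d s =>
    if (PySem.List.pyGet? s.toList 0).getD ' ' = c
    then d ++ [String.ofList ((izlociA s.toList).getD [])] else d) []

-- dict[str, Optional[list]] as an assoc list; keys are always distinct (dict.fromkeys of a
-- deduplicated list), assignment to an existing key = in-place replacement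
def omembe (tviti : List String) : List (String × List String) :=
  let avt := vsi_avtorjiA tviti
  let dic : List (String × Option (List String)) := avt.map (fun a => (a, none))
  let dic := tviti.foldl (fun dic i =>
    let k := avtorA i
    match (List.lookup k dic).getD none with
    | none => dic.map (fun p => if p.1 = k then (k, some (se_zacne_zA i '@')) else p)
    | some v => dic.map (fun p => if p.1 = k then (k, some (v ++ se_zacne_zA i '@')) else p)) dic
  -- by the end every None was overwritten (each key comes from some tweet); list values
  dic.map (fun p => (p.1, p.2.getD []))

-- ===== PORT B =====
-- idx = [k for k, ch in enumerate(beseda) if ch.isalnum()]; ''.join(beseda[idx[0]:idx[-1]+1])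
-- (the .getD 0 stands for the IndexError path idx[0] on an alnum-free word, excluded by Pre_)
def trimB (w : List Char) : String :=
  let idx := ((PySem.List.enumerate w).filter (fun p => PySem.Chars.isalnum p.2)).map (·.1)
  String.ofList (PySem.List.slice w (some ((PySem.List.pyGet? idx 0).getD 0))
    (some ((PySem.List.pyGet? idx (-1)).getD 0 + 1)))

-- the body of Source B's `for c in t + ' '` loop: state = (omenjeni, beseda)
def scanStep (st : List String × List Char) (c : Char) : List String × List Char :=
  if PySem.Chars.isspace c then
    (if st.2.head? = some '@' then st.1 ++ [trimB st.2] else st.1, ([] : List Char))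
  else (st.1, st.2 ++ [c])

def mentionsB (t : String) : List String :=
  ((t.toList ++ [' ']).foldl scanStep (([] : List String), ([] : List Char))).1

-- i = t.find(':'); avt = t if i < 0 else t[:i]; rez.setdefault(avt, []).extend(...)
def omembe_alt (tviti : List String) : List (String × List String) :=
  tviti.foldl (fun rez t =>
    let i := PySem.Str.find t ":"
    let avt := if i < 0 then t else String.ofList (PySem.List.slice t.toList none (some i))
    let ment := mentionsB t
    let rez := if rez.any (fun p => p.1 = avt) then rez else rez ++ [(avt, [])]
    rez.map (fun p => if p.1 = avt then (p.1, p.2 ++ ment) else p)) []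

-- ===== PRECONDITION & SPEC =====
-- Pre_ excludes exactly the inputs where both programs raise IndexError: a whitespace-word
-- starting with '@' that contains no alphanumeric character (A strips it to "" and indexes
-- into it; B indexes into its empty list of alphanumeric positions).
def Pre_omembe (tviti : List String) : Prop :=
  ∀ t ∈ tviti, ∀ w ∈ PySem.Str.split₀ t,
    (PySem.List.pyGet? w.toList 0).getD ' ' = '@' → w.toList.any PySem.Chars.isalnum = true
instance (tviti : List String) : Decidable (Pre_omembe tviti) := by unfold Pre_omembe; infer_instance

def pvWitness_omembe : List String := ["ana: hi @bob, see @c-d!", "bob: yo @ana", "ana: again @e."]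

def Spec_omembe (tviti : List String) (out : List (String × List String)) : Prop := out = omembe_alt tviti
instance (tviti : List String) (out : List (String × List String)) : Decidable (Spec_omembe tviti out) := by unfold Spec_omembe; infer_instance

-- ===== CLAIM (what is proved, stated in full; the proofs are below) =====
def Claim_equal_omembe : Prop := ∀ (tviti : List String), Dom_omembe tviti → Pre_omembe tviti → Spec_omembe tviti (omembe tviti)

-- ===== LEMMAS AND PROOFS =====

-- not alphanumeric (the character class both trim phases remove)
def qna (c : Char) : Bool := !PySem.Chars.isalnum c

-- mentions contributed to author a by the tweets ts under per-tweet extractor f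
def msOf (f : String → List String) (ts : List String) (a : String) : List String :=
  (ts.filter (fun t => avtorA t == a)).flatMap f

-- first occurrences of authors of ts that are not in `used`
def newA : List String → List String → List String
  | [], _ => []
  | t :: ts, used =>
      if avtorA t ∈ used then newA ts used else avtorA t :: newA ts (avtorA t :: used)

-- ---------- A's author = prefix of the tweet before the first ':' ----------

theorem splitOn_go_acc (sep : List Char) : ∀ (fuel : Nat) (l cur : List Char) (acc : List (List Char)),
    PySem.Chars.splitOn.go sep fuel l cur acc
      = acc.reverse ++ PySem.Chars.splitOn.go sep fuel l cur [] := by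
  intro fuel
  induction fuel with
  | zero => intro l cur acc; simp [PySem.Chars.splitOn.go]
  | succ fuel ih =>
    intro l cur acc
    cases l with
    | nil => simp [PySem.Chars.splitOn.go]
    | cons c rest =>
      simp only [PySem.Chars.splitOn.go]
      by_cases hp : sep.isPrefixOf (c :: rest) = true
      · rw [if_pos hp, if_pos hp, ih _ _ (cur.reverse :: acc), ih _ _ [cur.reverse]]
        simp
      · rw [if_neg hp, if_neg hp, ih _ _ acc]

theorem splitOn_colon_head : ∀ (fuel : Nat) (l cur : List Char), l.length ≤ fuel →
    ∃ tl, PySem.Chars.splitOn.go [':'] fuel l cur []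
      = (cur.reverse ++ l.takeWhile (fun c => !(c == ':'))) :: tl := by
  intro fuel
  induction fuel with
  | zero =>
    intro l cur h
    have : l = [] := List.eq_nil_of_length_eq_zero (Nat.le_zero.mp h)
    subst this
    exact ⟨[], by simp [PySem.Chars.splitOn.go]⟩
  | succ fuel ih =>
    intro l cur h
    cases l with
    | nil => exact ⟨[], by simp [PySem.Chars.splitOn.go]⟩
    | cons c rest =>
      simp only [PySem.Chars.splitOn.go]
      by_cases hc : c = ':'
      · have hp : [':'].isPrefixOf (c :: rest) = true := by simp [List.isPrefixOf, hc]
        rw [if_pos hp, splitOn_go_acc]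
        refine ⟨PySem.Chars.splitOn.go [':'] fuel (List.drop 1 (c :: rest)) [] [], ?_⟩
        simp [hc]
      · have hp : ([':'].isPrefixOf (c :: rest)) = false := by
          simpa [List.isPrefixOf] using beq_eq_false_iff_ne.mpr (Ne.symm hc)
        rw [if_neg (by simp [hp])]
        obtain ⟨tl, htl⟩ := ih rest (c :: cur) (by simpa using Nat.le_of_succ_le_succ h)
        refine ⟨tl, ?_⟩
        rw [htl]
        have hcb : (c == ':') = false := beq_eq_false_iff_ne.mpr hc
        simp [hcb]

theorem avtorA_eq_takeWhile (t : String) :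
    avtorA t = String.ofList (t.toList.takeWhile (fun c => !(c == ':'))) := by
  have hsep : (":" : String).toList = [':'] := rfl
  have hs : PySem.Str.split? t ":" = some ((PySem.Chars.splitOn t.toList [':']).map String.ofList) := by
    simp [PySem.Str.split?, PySem.Chars.split?, hsep]
  obtain ⟨tl, htl⟩ := splitOn_colon_head (t.toList.length + 1) t.toList [] (by omega)
  unfold avtorA
  rw [hs]
  simp only [Option.getD_some, PySem.Chars.splitOn, htl]
  simp

-- ---------- B's author (find-based) = the same prefix ----------

theorem find_go_colon : ∀ (l : List Char) (k : Nat),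
    PySem.Chars.find.go [':'] l k
      = if ':' ∈ l then ((k : Int) + ((l.takeWhile (fun c => !(c == ':'))).length : Int)) else -1 := by
  intro l
  induction l with
  | nil => intro k; simp [PySem.Chars.find.go]
  | cons c rest ih =>
    intro k
    simp only [PySem.Chars.find.go]
    by_cases hc : c = ':'
    · have hp : [':'].isPrefixOf (c :: rest) = true := by simp [List.isPrefixOf, hc]
      rw [if_pos hp]
      have hcb : (c == ':') = true := beq_iff_eq.mpr hc
      simp [hc]
    · have hp : ([':'].isPrefixOf (c :: rest)) = false := by
        simpa [List.isPrefixOf] using beq_eq_false_iff_ne.mpr (Ne.symm hc)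
      rw [if_neg (by simp [hp]), ih (k + 1)]
      have hcb : (c == ':') = false := beq_eq_false_iff_ne.mpr hc
      by_cases hm : ':' ∈ rest
      · have : ':' ∈ c :: rest := List.mem_cons_of_mem _ hm
        simp [hm, this, hcb]
        omega
      · have : ':' ∉ c :: rest := by
          intro hx
          rcases List.mem_cons.mp hx with he | he
          · exact hc he.symm
          · exact hm he
        simp [hm, this]

theorem take_takeWhile {α : Type} (p : α → Bool) (l : List α) :
    l.take ((l.takeWhile p).length) = l.takeWhile p := by
  induction l with
  | nil => simp
  | cons c cs ih => by_cases h : p c <;> simp [h, ih]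

theorem authorB_eq (t : String) :
    (if PySem.Str.find t ":" < 0 then t
     else String.ofList (PySem.List.slice t.toList none (some (PySem.Str.find t ":"))))
      = avtorA t := by
  rw [avtorA_eq_takeWhile]
  have hf : PySem.Str.find t ":" = PySem.Chars.find t.toList [':'] := PySem.Str.find_eq t ":"
  have hfc : PySem.Chars.find t.toList [':']
      = if ':' ∈ t.toList then (((t.toList.takeWhile (fun c => !(c == ':'))).length : Int)) else -1 := by
    have := find_go_colon t.toList 0
    simpa [PySem.Chars.find] using this
  by_cases hm : ':' ∈ t.toList
  · have hpos : ¬ (PySem.Str.find t ":" < 0) := by rw [hf, hfc]; simp [hm]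
    rw [if_neg hpos, hf, hfc, if_pos hm]
    rw [PySem.List.slice_to_natCast]
    rw [take_takeWhile]
  · have hneg : PySem.Str.find t ":" < 0 := by rw [hf, hfc]; simp [hm]
    rw [if_pos hneg]
    have : t.toList.takeWhile (fun c => !(c == ':')) = t.toList := by
      rw [List.takeWhile_eq_self_iff]
      intro c hc
      exact by simp [beq_eq_false_iff_ne.mpr (fun he : c = ':' => hm (he ▸ hc))]
    rw [this]
    exact String.ofList_toList.symm

-- ---------- the trim slice = A's two-sided dropWhile ----------

theorem dropWhile_eq_drop {α : Type} (p : α → Bool) (l : List α) :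
    l.dropWhile p = l.drop ((l.takeWhile p).length) := by
  induction l with
  | nil => simp
  | cons c cs ih => by_cases h : p c <;> simp [h, ih]

-- F w s = the alnum positions of w, offset by s (B's idx list)
def fIdx (w : List Char) (s : Int) : List Int :=
  ((PySem.List.enumerate w s).filter (fun p => PySem.Chars.isalnum p.2)).map (·.1)

theorem fIdx_cons (c : Char) (cs : List Char) (s : Int) :
    fIdx (c :: cs) s = if PySem.Chars.isalnum c then s :: fIdx cs (s + 1) else fIdx cs (s + 1) := by
  simp only [fIdx, PySem.List.enumerate_cons, List.filter_cons]
  by_cases h : PySem.Chars.isalnum c <;> simp [h]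

theorem fIdx_head (w : List Char) : ∀ (s : Int), w.any PySem.Chars.isalnum = true →
    (fIdx w s).head? = some (s + ((w.takeWhile qna).length : Int)) := by
  induction w with
  | nil => intro s h; simp at h
  | cons c cs ih =>
    intro s h
    rw [fIdx_cons]
    by_cases hc : PySem.Chars.isalnum c = true
    · simp [hc, qna]
    · simp only [Bool.not_eq_true] at hc
      have hcs : cs.any PySem.Chars.isalnum = true := by simpa [hc] using h
      rw [if_neg (by simp [hc]), ih (s + 1) hcs]
      have htw : List.takeWhile qna (c :: cs) = c :: List.takeWhile qna cs := by
        simp [qna, hc]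
      rw [htw, List.length_cons]
      congr 1
      push_cast
      ring

theorem fIdx_append (ys : List Char) (c : Char) : ∀ (s : Int),
    fIdx (ys ++ [c]) s = fIdx ys s ++ (if PySem.Chars.isalnum c then [s + ys.length] else []) := by
  induction ys with
  | nil => intro s; simp [fIdx]; by_cases h : PySem.Chars.isalnum c <;> simp [h]
  | cons y ys ih =>
    intro s
    rw [List.cons_append, fIdx_cons, fIdx_cons, ih (s + 1)]
    have harith : s + 1 + (ys.length : Int) = s + ((y :: ys).length : Int) := by
      simp only [List.length_cons]; push_cast; ring
    by_cases hy : PySem.Chars.isalnum y <;> simp [hy, harith]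

theorem fIdx_last (w : List Char) : ∀ (s : Int), w.any PySem.Chars.isalnum = true →
    (fIdx w s).getLast? = some (s + (w.length : Int) - 1 - ((w.reverse.takeWhile qna).length : Int)) := by
  induction w using List.reverseRecOn with
  | nil => intro s h; simp at h
  | append_singleton ys c ih =>
    intro s h
    rw [fIdx_append]
    by_cases hc : PySem.Chars.isalnum c = true
    · have h1 : ((ys ++ [c]).reverse.takeWhile qna) = [] := by
        simp [qna, hc]
      rw [if_pos hc, List.getLast?_concat, h1]
      simp only [List.length_append, List.length_cons, List.length_nil]
      congr 1
      push_cast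
      ring
    · simp only [Bool.not_eq_true] at hc
      have hys : ys.any PySem.Chars.isalnum = true := by
        rcases List.any_eq_true.mp h with ⟨x, hx, hxa⟩
        rcases List.mem_append.mp hx with hx | hx
        · exact List.any_eq_true.mpr ⟨x, hx, hxa⟩
        · simp at hx; rw [hx] at hxa; simp [hc] at hxa
      have h1 : ((ys ++ [c]).reverse.takeWhile qna) = c :: (ys.reverse.takeWhile qna) := by
        simp [qna, hc]
      rw [if_neg (by simp [hc]), List.append_nil, ih s hys, h1]
      simp only [List.length_append, List.length_cons, List.length_nil]
      congr 1
      push_cast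
      ring

-- length of the reverse-side strip is strictly below the word length
theorem rstrip_lt (w : List Char) (hw : w.any PySem.Chars.isalnum = true) :
    ((w.reverse.takeWhile qna).length) < w.length := by
  by_contra hge
  have hle : w.length ≤ (w.reverse.takeWhile qna).length := Nat.le_of_not_lt hge
  have hpre := List.takeWhile_prefix (l := w.reverse) (p := qna)
  have hlen : (w.reverse.takeWhile qna).length = w.reverse.length :=
    Nat.le_antisymm (hpre.length_le) (by simpa using hle)
  have heq : w.reverse.takeWhile qna = w.reverse := hpre.eq_of_length hlen
  have hall := List.takeWhile_eq_self_iff.mp heq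
  rcases List.any_eq_true.mp hw with ⟨x, hx, hxa⟩
  have := hall x (List.mem_reverse.mpr hx)
  simp [qna, hxa] at this

-- (izlociA w).getD [] as two-sided dropWhile, under an alnum char present
theorem stripFrontA_eq (w : List Char) (hw : w.any PySem.Chars.isalnum = true) :
    stripFrontA w = some (w.dropWhile qna) := by
  induction w with
  | nil => simp at hw
  | cons c cs ih =>
    simp only [stripFrontA, List.dropWhile_cons, qna]
    by_cases hc : PySem.Chars.isalnum c = true
    · simp [hc]
    · simp only [Bool.not_eq_true] at hc
      simp only [hc, Bool.not_false]
      exact ih (by simpa [hc] using hw)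

theorem stripBackA_concat (l : List Char) (c : Char) :
    stripBackA (l ++ [c]) = if PySem.Chars.isalnum c = false then stripBackA l else some (l ++ [c]) := by
  rw [stripBackA.eq_def]
  have hne : l ++ [c] ≠ [] := by simp
  rw [dif_neg hne]
  simp

theorem stripBackA_rev_eq (v : List Char) (hv : v.any PySem.Chars.isalnum = true) :
    stripBackA v.reverse = some ((v.dropWhile qna).reverse) := by
  induction v with
  | nil => simp at hv
  | cons c cs ih =>
    rw [List.reverse_cons, stripBackA_concat]
    simp only [List.dropWhile_cons, qna]
    by_cases hc : PySem.Chars.isalnum c = true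
    · simp [hc]
    · simp only [Bool.not_eq_true] at hc
      simp only [hc, Bool.not_false]
      exact ih (by simpa [hc] using hv)

theorem any_dropWhile_qna (w : List Char) (hw : w.any PySem.Chars.isalnum = true) :
    (w.dropWhile qna).any PySem.Chars.isalnum = true := by
  induction w with
  | nil => simp at hw
  | cons c cs ih =>
    simp only [List.dropWhile_cons, qna]
    by_cases hc : PySem.Chars.isalnum c = true
    · simp [hc]
    · simp only [Bool.not_eq_true] at hc
      simp only [hc, Bool.not_false]
      exact ih (by simpa [hc] using hw)

theorem izlociA_eq (w : List Char) (hw : w.any PySem.Chars.isalnum = true) :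
    (izlociA w).getD [] = ((w.dropWhile qna).reverse.dropWhile qna).reverse := by
  have hu : stripFrontA w = some (w.dropWhile qna) := stripFrontA_eq w hw
  have huany : (w.dropWhile qna).any PySem.Chars.isalnum = true := any_dropWhile_qna w hw
  have hback : stripBackA (w.dropWhile qna) = some (((w.dropWhile qna).reverse.dropWhile qna).reverse) := by
    have := stripBackA_rev_eq (w.dropWhile qna).reverse (by simpa using huany)
    simpa using this
  simp [izlociA, hu, hback]

-- trimB computes exactly A's izloci_besedo (front strip then back strip)
theorem trimB_eq (w : List Char) (hw : w.any PySem.Chars.isalnum = true) :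
    trimB w = String.ofList (((w.dropWhile qna).reverse.dropWhile qna).reverse) := by
  have hhead := fIdx_head w 0 hw
  have hlast := fIdx_last w 0 hw
  have htlt : (w.reverse.takeWhile qna).length < w.length := rstrip_lt w hw
  have hany_u : (w.dropWhile qna).any PySem.Chars.isalnum = true := any_dropWhile_qna w hw
  have hu_lt : ((w.dropWhile qna).reverse.takeWhile qna).length < (w.dropWhile qna).length :=
    rstrip_lt _ hany_u
  have hb : ((0 : Int) + (w.length : Int) - 1 - ((w.reverse.takeWhile qna).length : Int) + 1)
      = ((w.length - (w.reverse.takeWhile qna).length : Nat) : Int) := by omega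
  have hslice : trimB w = String.ofList ((w.drop ((w.takeWhile qna).length)).take
      ((w.length - (w.reverse.takeWhile qna).length) - (w.takeWhile qna).length)) := by
    unfold trimB
    show String.ofList (PySem.List.slice w (some ((PySem.List.pyGet? (fIdx w 0) 0).getD 0))
      (some ((PySem.List.pyGet? (fIdx w 0) (-1)).getD 0 + 1))) = _
    rw [PySem.List.pyGet?_zero, PySem.List.pyGet?_neg_one, ← List.head?_eq_getElem?,
      hhead, hlast]
    simp only [Option.getD_some]
    rw [hb, show ((0 : Int) + ((w.takeWhile qna).length : Int)) = (((w.takeWhile qna).length : Nat) : Int) by ring]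
    rw [PySem.List.slice_natCast]
  rw [hslice]
  congr 1
  have heqt : (w.dropWhile qna).reverse.takeWhile qna = w.reverse.takeWhile qna := by
    conv_rhs => rw [← List.takeWhile_append_dropWhile (p := qna) (l := w)]
    rw [List.reverse_append, List.takeWhile_append,
      if_neg (by simpa using Nat.ne_of_lt hu_lt)]
  rw [dropWhile_eq_drop qna ((w.dropWhile qna).reverse), heqt, List.reverse_drop]
  simp only [List.reverse_reverse, List.length_reverse]
  rw [dropWhile_eq_drop qna w, List.length_drop]
  congr 1
  omega

-- ---------- the character scanner = the word fold over split() ----------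

def procW (d : List String) (w : List Char) : List String :=
  if w.head? = some '@' then d ++ [trimB w] else d

theorem split0_go_acc (l : List Char) : ∀ (cur : List Char) (acc : List (List Char)),
    PySem.Chars.split₀.go l cur acc = acc.reverse ++ PySem.Chars.split₀.go l cur [] := by
  induction l with
  | nil =>
    intro cur acc
    simp only [PySem.Chars.split₀.go]
    by_cases h : cur.isEmpty = true <;> simp [h]
  | cons c rest ih =>
    intro cur acc
    simp only [PySem.Chars.split₀.go]
    by_cases hs : PySem.Chars.isspace c = true
    · rw [if_pos hs, if_pos hs]
      by_cases he : cur.isEmpty = true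
      · rw [if_pos he, if_pos he, ih [] acc]
      · rw [if_neg he, if_neg he, ih [] (cur.reverse :: acc), ih [] [cur.reverse]]
        simp
    · rw [if_neg hs, if_neg hs, ih (c :: cur) acc]

theorem scan_eq (l : List Char) : ∀ (out : List String) (cur : List Char),
    ((l ++ [' ']).foldl scanStep (out, cur)).1
      = (PySem.Chars.split₀.go l cur.reverse []).foldl procW out := by
  induction l with
  | nil =>
    intro out cur
    have hsp : PySem.Chars.isspace ' ' = true := by decide
    simp only [List.nil_append, List.foldl_cons, List.foldl_nil, scanStep, hsp,
      PySem.Chars.split₀.go]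
    cases cur with
    | nil => simp
    | cons c cs =>
      simp [procW]
  | cons c rest ih =>
    intro out cur
    simp only [List.cons_append, List.foldl_cons, PySem.Chars.split₀.go]
    by_cases hs : PySem.Chars.isspace c = true
    · rw [if_pos hs]
      have hstep : scanStep (out, cur) c
          = (if cur.head? = some '@' then out ++ [trimB cur] else out, ([] : List Char)) := by
        simp [scanStep, hs]
      rw [hstep]
      by_cases he : cur = []
      · subst he
        simp only [List.head?_nil, List.reverse_nil, List.isEmpty_nil]
        have := ih (if (none : Option Char) = some '@' then out ++ [trimB []] else out) []
        simpa using this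
      · have hne : cur.reverse.isEmpty = false := by
          cases cur with
          | nil => exact absurd rfl he
          | cons a l => simp
        rw [if_neg (ne_true_of_eq_false hne)]
        rw [split0_go_acc rest [] [cur.reverse.reverse], ih _ []]
        simp [procW]
    · rw [if_neg hs]
      have hstep : scanStep (out, cur) c = (out, cur ++ [c]) := by simp [scanStep, hs]
      rw [hstep, ih out (cur ++ [c])]
      simp

-- the per-word fold: B's procW-fold = A's izlociA-fold, word by word
theorem words_fold_eq (ws : List (List Char))
    (h : ∀ w ∈ ws, w.head? = some '@' → w.any PySem.Chars.isalnum = true) :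
    ∀ (init : List String),
    ws.foldl (fun d w => if (PySem.List.pyGet? w 0).getD ' ' = '@'
        then d ++ [String.ofList ((izlociA w).getD [])] else d) init
      = ws.foldl procW init := by
  induction ws with
  | nil => intro init; rfl
  | cons w ws ih =>
    intro init
    have ih' := ih (fun x hx => h x (List.mem_cons_of_mem _ hx))
    simp only [List.foldl_cons]
    cases w with
    | nil =>
      have h1 : ((PySem.List.pyGet? ([] : List Char) 0).getD ' ' = '@') = False := by
        simp [PySem.List.pyGet?, PySem.List.pyIdx?]
      simp only [procW, List.head?_nil, h1]
      rw [if_neg (by simp), if_neg (by simp)]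
      exact ih' init
    | cons c cs =>
      simp only [PySem.List.pyGet?_zero_cons, procW, List.head?_cons, Option.getD_some,
        Option.some.injEq]
      by_cases hc : c = '@'
      · rw [if_pos hc, if_pos hc]
        have hany := h (c :: cs) (List.mem_cons_self ..) (by simp [hc])
        rw [izlociA_eq _ hany, ← trimB_eq _ hany]
        exact ih' _
      · rw [if_neg hc, if_neg hc]
        exact ih' init

theorem mentionsB_eq (t : String)
    (ht : ∀ w ∈ PySem.Str.split₀ t,
      (PySem.List.pyGet? w.toList 0).getD ' ' = '@' → w.toList.any PySem.Chars.isalnum = true) :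
    mentionsB t = se_zacne_zA t '@' := by
  have hscan := scan_eq t.toList [] []
  have hB : mentionsB t = (PySem.Chars.split₀ t.toList).foldl procW [] := by
    simpa [mentionsB, PySem.Chars.split₀] using hscan
  have hsplit : PySem.Chars.split₀ t.toList = (PySem.Str.split₀ t).map String.toList :=
    (PySem.Str.split₀_map_toList t).symm
  have hA : se_zacne_zA t '@'
      = ((PySem.Str.split₀ t).map String.toList).foldl
          (fun d w => if (PySem.List.pyGet? w 0).getD ' ' = '@'
            then d ++ [String.ofList ((izlociA w).getD [])] else d) [] := by
    simp only [se_zacne_zA, List.foldl_map]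
  rw [hB, hsplit, hA]
  exact (words_fold_eq _ (fun w hw => by
    obtain ⟨s, hs, rfl⟩ := List.mem_map.mp hw
    intro hh
    apply ht s hs
    cases hl : s.toList with
    | nil => rw [hl] at hh; simp at hh
    | cons c cs =>
      rw [hl] at hh
      simp only [List.head?_cons, Option.some.injEq] at hh
      simp only [PySem.List.pyGet?_zero_cons, Option.getD_some]
      simpa using hh) []).symm

-- ---------- the one-pass dict build (generic machinery) ----------

theorem newA_congr (ts : List String) : ∀ (u u' : List String), (∀ x, x ∈ u ↔ x ∈ u') →
    newA ts u = newA ts u' := by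
  induction ts with
  | nil => intro u u' _; rfl
  | cons t ts ih =>
    intro u u' h
    simp only [newA]
    by_cases hm : avtorA t ∈ u
    · rw [if_pos hm, if_pos ((h _).mp hm), ih u u' h]
    · rw [if_neg hm, if_neg (fun hx => hm ((h _).mpr hx))]
      exact congrArg _ (ih _ _ (fun x => by simp [h x]))

theorem mem_newA (ts : List String) : ∀ (u : List String) (a : String), a ∈ newA ts u →
    a ∉ u ∧ ∃ t ∈ ts, avtorA t = a := by
  induction ts with
  | nil => intro u a ha; simp [newA] at ha
  | cons t ts ih =>
    intro u a ha
    simp only [newA] at ha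
    by_cases hm : avtorA t ∈ u
    · rw [if_pos hm] at ha
      obtain ⟨h1, tw, htw, he⟩ := ih u a ha
      exact ⟨h1, tw, List.mem_cons_of_mem _ htw, he⟩
    · rw [if_neg hm] at ha
      rcases List.mem_cons.mp ha with h | h
      · exact ⟨h ▸ hm, t, List.mem_cons_self .., h.symm⟩
      · obtain ⟨h1, tw, htw, he⟩ := ih _ a h
        exact ⟨fun hx => h1 (List.mem_cons_of_mem _ hx), tw, List.mem_cons_of_mem _ htw, he⟩

theorem nodup_newA (ts : List String) : ∀ (u : List String), (newA ts u).Nodup := by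
  induction ts with
  | nil => intro u; simp [newA]
  | cons t ts ih =>
    intro u
    simp only [newA]
    by_cases hm : avtorA t ∈ u
    · rw [if_pos hm]; exact ih u
    · rw [if_neg hm]
      refine List.Nodup.cons (fun hx => ?_) (ih _)
      exact (mem_newA ts _ _ hx).1 (List.mem_cons_self ..)

theorem authors_mem_newA (ts : List String) : ∀ (u : List String) (t : String), t ∈ ts →
    avtorA t ∈ newA ts u ∨ avtorA t ∈ u := by
  induction ts with
  | nil => intro _ _ h; simp at h
  | cons t' ts ih =>
    intro u t ht
    simp only [newA]
    by_cases hm : avtorA t' ∈ u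
    · rw [if_pos hm]
      rcases List.mem_cons.mp ht with rfl | h
      · exact Or.inr hm
      · exact ih u t h
    · rw [if_neg hm]
      rcases List.mem_cons.mp ht with rfl | h
      · exact Or.inl (List.mem_cons_self ..)
      · rcases ih (avtorA t' :: u) t h with hx | hx
        · exact Or.inl (List.mem_cons_of_mem _ hx)
        · rcases List.mem_cons.mp hx with he | hu
          · exact Or.inl (he ▸ List.mem_cons_self ..)
          · exact Or.inr hu

theorem vsi_eq_newA_aux (ts : List String) : ∀ (acc : List String),
    ts.foldl (fun d s => if PySem.List.count d (avtorA s) == 0 then d ++ [avtorA s] else d) acc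
      = acc ++ newA ts acc := by
  induction ts with
  | nil => intro acc; simp [newA]
  | cons t ts ih =>
    intro acc
    have hcnt : (PySem.List.count acc (avtorA t) == 0) = true ↔ avtorA t ∉ acc := by
      simp [PySem.List.count, List.count_eq_zero]
    simp only [List.foldl_cons, newA]
    by_cases hm : avtorA t ∈ acc
    · rw [if_neg (fun hx => (hcnt.mp hx) hm), if_pos hm, ih]
    · rw [if_pos (hcnt.mpr hm), if_neg hm, ih]
      rw [newA_congr ts (acc ++ [avtorA t]) (avtorA t :: acc) (fun x => by simp; tauto)]
      simp

theorem vsi_eq_newA (ts : List String) : vsi_avtorjiA ts = newA ts [] := by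
  have := vsi_eq_newA_aux ts []
  simpa [vsi_avtorjiA] using this

theorem lookup_eq_of_mem_nodup {α : Type} (d : List (String × α)) (k : String) (v : α)
    (hmem : (k, v) ∈ d) (hnd : (d.map (·.1)).Nodup) : List.lookup k d = some v := by
  induction d with
  | nil => simp at hmem
  | cons p d ih =>
    simp only [List.map_cons, List.nodup_cons] at hnd
    rcases List.mem_cons.mp hmem with rfl | h
    · simp [List.lookup]
    · have hk : k ≠ p.1 := by
        intro he
        exact hnd.1 (he ▸ List.mem_map_of_mem (f := (·.1)) h)
      obtain ⟨p1, p2⟩ := p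
      have hb : (k == p1) = false := beq_eq_false_iff_ne.mpr hk
      simp only [List.lookup, hb]
      exact ih h hnd.2

theorem msOf_cons_self (f : String → List String) (t : String) (ts : List String) (a : String)
    (h : avtorA t = a) : msOf f (t :: ts) a = f t ++ msOf f ts a := by
  simp [msOf, h]

theorem msOf_cons_ne (f : String → List String) (t : String) (ts : List String) (a : String)
    (h : avtorA t ≠ a) : msOf f (t :: ts) a = msOf f ts a := by
  simp [msOf, h]

theorem keys_setA {α : Type} (d : List (String × α)) (k : String) (g : String × α → α) :
    (d.map (fun p => if p.1 = k then (k, g p) else p)).map (·.1) = d.map (·.1) := by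
  rw [List.map_map]
  apply List.map_congr_left
  intro p _
  by_cases hp : p.1 = k <;> simp [hp]

-- B's setdefault step has the extend-or-append shape
theorem setdef_step_eq (rez : List (String × List String)) (a : String) (m : List String) :
    (if rez.any (fun p => p.1 = a) then rez else rez ++ [(a, [])]).map
        (fun p => if p.1 = a then (p.1, p.2 ++ m) else p)
      = if rez.any (fun p => p.1 = a)
        then rez.map (fun p => if p.1 = a then (a, p.2 ++ m) else p)
        else rez ++ [(a, m)] := by
  by_cases h : rez.any (fun p => p.1 = a) = true
  · rw [if_pos h, if_pos h]
    apply List.map_congr_left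
    intro p _
    by_cases hp : p.1 = a <;> simp [hp]
  · rw [if_neg h, if_neg h, List.map_append]
    have hnone : ∀ p ∈ rez, p.1 ≠ a := by
      intro p hp he
      exact h (List.any_eq_true.mpr ⟨p, hp, decide_eq_true he⟩)
    congr 1
    · calc rez.map (fun p => if p.1 = a then (p.1, p.2 ++ m) else p)
          = rez.map (fun p => p) := List.map_congr_left (fun p hp => by simp [hnone p hp])
        _ = rez := by simp
    · simp

-- B's fold, characterised
theorem genB_eq (f : String → List String) (ts : List String) :
    ∀ (d : List (String × List String)),
    ts.foldl (fun dic t =>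
        let ment := f t
        if dic.any (fun p => p.1 = avtorA t)
        then dic.map (fun p => if p.1 = avtorA t then (avtorA t, p.2 ++ ment) else p)
        else dic ++ [(avtorA t, ment)]) d
      = d.map (fun q => (q.1, q.2 ++ msOf f ts q.1)) ++ (newA ts (d.map (·.1))).map (fun a => (a, msOf f ts a)) := by
  induction ts with
  | nil =>
    intro d
    simp only [List.foldl_nil]
    have h0 : ∀ q : String × List String, (q.1, q.2 ++ msOf f [] q.1) = q := by
      intro q
      show (q.1, q.2 ++ []) = q
      rw [List.append_nil]
    calc d = d.map (fun q => q) := by rw [List.map_id']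
      _ = d.map (fun q => (q.1, q.2 ++ msOf f [] q.1)) := (List.map_congr_left (fun q _ => h0 q)).symm
      _ = _ := by rw [show newA [] (d.map (·.1)) = [] from rfl, List.map_nil, List.append_nil]
  | cons t ts ih =>
    intro d
    have hany : (d.any (fun p => p.1 = avtorA t) = true) ↔ avtorA t ∈ d.map (·.1) := by
      rw [List.any_eq_true]
      constructor
      · rintro ⟨p, hp, he⟩
        exact List.mem_map.mpr ⟨p, hp, of_decide_eq_true he⟩
      · intro h
        obtain ⟨p, hp, he⟩ := List.mem_map.mp h
        exact ⟨p, hp, decide_eq_true he⟩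
    simp only [List.foldl_cons]
    by_cases hmem : avtorA t ∈ d.map (·.1)
    · rw [if_pos (hany.mpr hmem), ih, keys_setA]
      have hnew : newA (t :: ts) (d.map (·.1)) = newA ts (d.map (·.1)) := by
        simp [newA, hmem]
      rw [hnew]
      congr 1
      · rw [List.map_map]
        apply List.map_congr_left
        intro p _
        by_cases hp : p.1 = avtorA t
        · simp only [Function.comp_apply, if_pos hp]
          rw [msOf_cons_self f t ts p.1 hp.symm, ← hp]
          simp [List.append_assoc]
        · simp only [Function.comp_apply, if_neg hp]
          rw [msOf_cons_ne f t ts p.1 (fun h => hp h.symm)]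
      · apply List.map_congr_left
        intro a ha
        have hnot := (mem_newA ts _ a ha).1
        have hne : avtorA t ≠ a := fun h => hnot (h ▸ hmem)
        rw [msOf_cons_ne f t ts a hne]
    · rw [if_neg (fun h => hmem (hany.mp h)), ih]
      have hkeys : ((d ++ [(avtorA t, f t)]).map (·.1)) = d.map (·.1) ++ [avtorA t] := by simp
      rw [hkeys, newA_congr ts (d.map (·.1) ++ [avtorA t]) (avtorA t :: d.map (·.1))
        (fun x => by simp; tauto)]
      have hnew : newA (t :: ts) (d.map (·.1)) = avtorA t :: newA ts (avtorA t :: d.map (·.1)) := by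
        simp [newA, hmem]
      rw [hnew]
      have hdmap : d.map (fun q => (q.1, q.2 ++ msOf f ts q.1))
          = d.map (fun q => (q.1, q.2 ++ msOf f (t :: ts) q.1)) := by
        apply List.map_congr_left
        intro p hp
        have hne : avtorA t ≠ p.1 := fun h => hmem (h ▸ List.mem_map_of_mem (f := (·.1)) hp)
        rw [msOf_cons_ne f t ts p.1 hne]
      have htail : (newA ts (avtorA t :: d.map (·.1))).map (fun a => (a, msOf f ts a))
          = (newA ts (avtorA t :: d.map (·.1))).map (fun a => (a, msOf f (t :: ts) a)) := by
        apply List.map_congr_left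
        intro a ha
        have hnot := (mem_newA ts _ a ha).1
        have hne : avtorA t ≠ a := fun h => hnot (h ▸ List.mem_cons_self ..)
        rw [msOf_cons_ne f t ts a hne]
      rw [List.map_append, hdmap, htail]
      simp [msOf_cons_self f t ts (avtorA t) rfl, List.append_assoc]

-- omembe_alt, rewritten to the generic shape
theorem omembe_alt_eq_gen (tviti : List String) :
    omembe_alt tviti = tviti.foldl (fun dic t =>
      let ment := mentionsB t
      if dic.any (fun p => p.1 = avtorA t)
      then dic.map (fun p => if p.1 = avtorA t then (avtorA t, p.2 ++ ment) else p)
      else dic ++ [(avtorA t, ment)]) [] := by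
  unfold omembe_alt
  congr 1
  funext rez t
  dsimp only
  rw [authorB_eq t, setdef_step_eq]

def combA (f : String → List String) (v : Option (List String)) (ts : List String) (k : String) :
    Option (List String) :=
  match v with
  | some l => some (l ++ msOf f ts k)
  | none => if ts.any (fun t => avtorA t == k) then some (msOf f ts k) else none

theorem combA_cons_ne (f : String → List String) (v : Option (List String)) (t : String)
    (ts : List String) (k : String) (h : avtorA t ≠ k) :
    combA f v (t :: ts) k = combA f v ts k := by
  have hb : (avtorA t == k) = false := beq_eq_false_iff_ne.mpr h
  cases v <;> simp [combA, msOf_cons_ne f t ts k h, List.any_cons, hb]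

-- A's fold, characterised
theorem genA_eq (f : String → List String) (ts : List String) :
    ∀ (d : List (String × Option (List String))),
    (∀ t ∈ ts, avtorA t ∈ d.map (·.1)) → (d.map (·.1)).Nodup →
    ts.foldl (fun dic i =>
        match (List.lookup (avtorA i) dic).getD none with
        | none => dic.map (fun p => if p.1 = avtorA i then (avtorA i, some (f i)) else p)
        | some v => dic.map (fun p => if p.1 = avtorA i then (avtorA i, some (v ++ f i)) else p)) d
      = d.map (fun q => (q.1, combA f q.2 ts q.1)) := by
  induction ts with
  | nil =>
    intro d _ _
    symm
    calc d.map (fun q => (q.1, combA f q.2 [] q.1)) = d.map (fun q => q) := by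
          apply List.map_congr_left
          intro p _
          cases hv : p.2 <;> simp [combA, msOf, Prod.ext_iff, hv]
      _ = d := by simp
  | cons t ts ih =>
    intro d hall hnd
    have hin : avtorA t ∈ d.map (·.1) := hall t (List.mem_cons_self ..)
    obtain ⟨p₀, hp₀, hpa⟩ := List.mem_map.mp hin
    have hmem : (avtorA t, p₀.2) ∈ d := by
      have : (avtorA t, p₀.2) = p₀ := by rw [← hpa]
      rw [this]; exact hp₀
    have hlk : List.lookup (avtorA t) d = some p₀.2 := lookup_eq_of_mem_nodup d _ _ hmem hnd
    simp only [List.foldl_cons, hlk, Option.getD_some]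
    have hstep : ∀ (nv : Option (List String)),
        ts.foldl (fun dic i =>
          match (List.lookup (avtorA i) dic).getD none with
          | none => dic.map (fun p => if p.1 = avtorA i then (avtorA i, some (f i)) else p)
          | some v => dic.map (fun p => if p.1 = avtorA i then (avtorA i, some (v ++ f i)) else p))
          (d.map (fun p => if p.1 = avtorA t then (avtorA t, nv) else p))
        = (d.map (fun p => if p.1 = avtorA t then (avtorA t, nv) else p)).map
            (fun q => (q.1, combA f q.2 ts q.1)) := by
      intro nv
      apply ih
      · intro t' ht'
        rw [keys_setA]
        exact hall t' (List.mem_cons_of_mem _ ht')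
      · rw [keys_setA]
        exact hnd
    have hval : ∀ (p : String × Option (List String)), p ∈ d → p.1 = avtorA t → p.2 = p₀.2 := by
      intro p hp hp1
      have h2 : List.lookup (avtorA t) d = some p.2 := by
        rw [← hp1]
        exact lookup_eq_of_mem_nodup d _ _ (by rwa [show (p.1, p.2) = p from rfl]) hnd
      rw [hlk] at h2
      exact (Option.some.inj h2).symm
    have hfinish : ∀ (nv : Option (List String)),
        (∀ q : String × Option (List String), q ∈ d → q.1 = avtorA t →
          combA f nv ts (avtorA t) = combA f q.2 (t :: ts) q.1) →
        (d.map (fun p => if p.1 = avtorA t then (avtorA t, nv) else p)).map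
            (fun q => (q.1, combA f q.2 ts q.1))
        = d.map (fun q => (q.1, combA f q.2 (t :: ts) q.1)) := by
      intro nv hv
      rw [List.map_map]
      apply List.map_congr_left
      intro p hp
      by_cases hp1 : p.1 = avtorA t
      · simp only [Function.comp_apply, if_pos hp1]
        have := hv p hp hp1
        exact Prod.ext_iff.mpr ⟨hp1.symm, this⟩
      · simp only [Function.comp_apply, if_neg hp1]
        rw [combA_cons_ne f p.2 t ts p.1 (fun h => hp1 h.symm)]
    cases hv : p₀.2 with
    | none =>
      rw [hstep (some (f t))]
      apply hfinish
      intro q hq hq1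
      rw [hval q hq hq1, hv]
      have hb : (avtorA t == avtorA t) = true := beq_self_eq_true _
      simp [combA, List.any_cons, msOf_cons_self f t ts (avtorA t) rfl, hq1]
    | some l =>
      rw [hstep (some (l ++ f t))]
      apply hfinish
      intro q hq hq1
      rw [hval q hq hq1, hv]
      simp [combA, msOf_cons_self f t ts (avtorA t) rfl, hq1, List.append_assoc]

theorem flatMap_congr_mem {α β : Type} (f g : α → List β) :
    ∀ (l : List α), (∀ x ∈ l, f x = g x) → l.flatMap f = l.flatMap g := by
  intro l h
  induction l with
  | nil => rfl
  | cons x xs ih =>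
    simp only [List.flatMap_cons]
    rw [h x (List.mem_cons_self ..), ih (fun y hy => h y (List.mem_cons_of_mem _ hy))]

theorem msOf_congr (f g : String → List String) (ts : List String) (a : String)
    (h : ∀ t ∈ ts, f t = g t) : msOf f ts a = msOf g ts a := by
  unfold msOf
  exact flatMap_congr_mem f g _ (fun x hx => h x (List.mem_of_mem_filter hx))

-- ===== VERDICT (by name: the statement is the Claim_ definition above) =====
theorem omembe_spec : Claim_equal_omembe := by
  intro tviti _hdom hpre
  show omembe tviti = omembe_alt tviti
  have hVN := vsi_eq_newA tviti
  have hkeys : (((vsi_avtorjiA tviti).map (fun a => (a, (none : Option (List String))))).map (·.1))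
      = vsi_avtorjiA tviti := by simp [Function.comp_def]
  have hall : ∀ t ∈ tviti, avtorA t ∈
      (((vsi_avtorjiA tviti).map (fun a => (a, (none : Option (List String))))).map (·.1)) := by
    intro t ht
    rw [hkeys, hVN]
    rcases authors_mem_newA tviti [] t ht with h | h
    · exact h
    · simp at h
  have hnd2 : ((((vsi_avtorjiA tviti).map (fun a => (a, (none : Option (List String))))).map (·.1))).Nodup := by
    rw [hkeys, hVN]
    exact nodup_newA tviti []
  have eA : omembe tviti
      = (tviti.foldl (fun dic i =>
          match (List.lookup (avtorA i) dic).getD none with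
          | none => dic.map (fun p => if p.1 = avtorA i then (avtorA i, some (se_zacne_zA i '@')) else p)
          | some v => dic.map (fun p => if p.1 = avtorA i then (avtorA i, some (v ++ se_zacne_zA i '@')) else p))
          ((vsi_avtorjiA tviti).map (fun a => (a, (none : Option (List String)))))).map
            (fun p => (p.1, p.2.getD [])) := rfl
  rw [eA, genA_eq (fun j => se_zacne_zA j '@') tviti _ hall hnd2,
    omembe_alt_eq_gen, genB_eq mentionsB tviti []]
  simp only [List.map_nil, List.nil_append, List.map_map]
  rw [hVN]
  apply List.map_congr_left
  intro a ha
  obtain ⟨-, t0, ht0, he0⟩ := mem_newA tviti [] a ha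
  have hany : tviti.any (fun t => avtorA t == a) = true :=
    List.any_eq_true.mpr ⟨t0, ht0, beq_iff_eq.mpr he0⟩
  have hcomb : combA (fun j => se_zacne_zA j '@') none tviti a
      = some (msOf (fun j => se_zacne_zA j '@') tviti a) := by
    simp [combA, hany]
  show (a, (combA (fun j => se_zacne_zA j '@') none tviti a).getD []) = (a, msOf mentionsB tviti a)
  rw [hcomb, Option.getD_some]
  exact Prod.ext_iff.mpr ⟨rfl,
    msOf_congr _ _ tviti a (fun t ht => (mentionsB_eq t (hpre t ht)).symm)⟩
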